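-- pv_equiv track=rewrite | github.com/deysantanu84/python-portfolio | problemSolving/stringManipulation/countA.py | countAUtil
-- ===== SOURCE A (Python) =====
-- def countAUtil(A, n, x, y):
--     result = 0
--     countX = 0
--
--     for i in range(n):
--         if A[i] == x:
--             countX += 1
--
--         if A[i] == y:
--             result += countX
--
--     return result
-- ===== SOURCE B (Python) =====
-- def countAUtil(A, n, x, y):
--     # Phase 1: inclusive prefix-count table px[i] = #x in A[0..i]
--     prefix = A[:max(n, 0)]
--     px = []
--     c = 0
--     for v in prefix:
--         if v == x:
--             c += 1
--         px.append(c)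
--     # Phase 2: aggregate the table at the positions holding y
--     return sum(c for v, c in zip(prefix, px) if v == y)
-- ===== Notes on version B (the rewrite author's own statement) =====
-- stated objective: alternative
-- what changed: Replaces the fused single loop carrying (result, countX) by two distinct phases: one pass builds an inclusive prefix-count table px, a second pass sums px at the positions holding y.
import Mathlib
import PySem

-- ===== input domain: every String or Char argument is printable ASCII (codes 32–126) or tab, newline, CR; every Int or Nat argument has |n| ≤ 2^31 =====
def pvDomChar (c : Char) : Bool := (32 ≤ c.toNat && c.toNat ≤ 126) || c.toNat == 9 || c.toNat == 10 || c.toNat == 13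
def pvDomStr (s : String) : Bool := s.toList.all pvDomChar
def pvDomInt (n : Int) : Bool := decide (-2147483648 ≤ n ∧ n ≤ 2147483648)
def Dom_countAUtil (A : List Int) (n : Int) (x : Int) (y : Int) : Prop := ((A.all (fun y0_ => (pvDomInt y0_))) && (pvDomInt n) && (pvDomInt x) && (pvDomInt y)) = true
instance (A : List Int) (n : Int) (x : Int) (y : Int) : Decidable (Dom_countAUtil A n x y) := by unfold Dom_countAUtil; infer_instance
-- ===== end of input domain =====

-- B replaces A's fused single loop by two distinct phases (build an inclusive prefix-count
-- table, then aggregate it at the y-positions); objective: alternative, same cost.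

-- ===== PORT A =====
-- fused loop: for i in range(n): countX += (A[i]==x); result += countX if A[i]==y
def countAUtil (A : List Int) (n : Int) (x : Int) (y : Int) : Int :=
  ((PySem.List.pyRange 0 n 1).foldl
    (fun (s : Int × Int) i =>
      let v := PySem.List.pyGetD A i 0
      let cx := if v = x then s.2 + 1 else s.2
      (if v = y then s.1 + cx else s.1, cx)) (0, 0)).1

-- ===== PORT B =====
def countAUtil_alt (A : List Int) (n : Int) (x : Int) (y : Int) : Int :=
  let pref := PySem.List.slice A none (some (max n 0))
  let px := (pref.foldl
      (fun (p : List Int × Int) v =>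
        let c := if v = x then p.2 + 1 else p.2
        (p.1 ++ [c], c)) ([], 0)).1
  (pref.zip px).foldl (fun acc vc => if vc.1 = y then acc + vc.2 else acc) 0

-- ===== PRECONDITION & SPEC =====
-- Pre_ excludes n > len(A), where A raises IndexError (A[i] for i ≥ len(A)).
def Pre_countAUtil (A : List Int) (n : Int) (x : Int) (y : Int) : Prop :=
  n ≤ (A.length : Int)
instance (A : List Int) (n : Int) (x : Int) (y : Int) : Decidable (Pre_countAUtil A n x y) := by
  unfold Pre_countAUtil; infer_instance
def pvWitness_countAUtil : List Int × Int × Int × Int := ([1, 2, 1, 2], 4, 1, 2)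

def Spec_countAUtil (A : List Int) (n : Int) (x : Int) (y : Int) (out : Int) : Prop := out = countAUtil_alt A n x y
instance (A : List Int) (n : Int) (x : Int) (y : Int) (out : Int) : Decidable (Spec_countAUtil A n x y out) := by unfold Spec_countAUtil; infer_instance

-- ===== CLAIM (what is proved, stated in full; the proofs are below) =====
def Claim_equal_countAUtil : Prop := ∀ (A : List Int) (n : Int) (x : Int) (y : Int), Dom_countAUtil A n x y → Pre_countAUtil A n x y → Spec_countAUtil A n x y (countAUtil A n x y)

-- ===== LEMMAS AND PROOFS =====

-- structural description of B's prefix-count table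
def pxRec (x : Int) : List Int → Int → List Int
  | [], _ => []
  | v :: L, c => (if v = x then c + 1 else c) :: pxRec x L (if v = x then c + 1 else c)

theorem px_build (x : Int) (L : List Int) : ∀ (acc : List Int) (c : Int),
    L.foldl (fun (p : List Int × Int) v =>
        (p.1 ++ [if v = x then p.2 + 1 else p.2], if v = x then p.2 + 1 else p.2)) (acc, c)
      = (acc ++ pxRec x L c, (pxRec x L c).getLastD c) := by
  induction L with
  | nil => intro acc c; simp [pxRec]
  | cons v L ih =>
    intro acc c
    simp only [List.foldl, pxRec]
    rw [ih]
    simp only [List.append_assoc, Prod.mk.injEq, List.cons_append, List.getLastD]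
    refine ⟨rfl, ?_⟩
    cases pxRec x L (if v = x then c + 1 else c) <;> simp

theorem main_lemma (x y : Int) (L : List Int) : ∀ (c res : Int),
    (L.foldl
      (fun (s : Int × Int) v' =>
        let cx := if v' = x then s.2 + 1 else s.2
        (if v' = y then s.1 + cx else s.1, cx)) (res, c)).1
    = (L.zip (pxRec x L c)).foldl (fun acc vc => if vc.1 = y then acc + vc.2 else acc) res := by
  induction L with
  | nil => intro c res; simp
  | cons v L ih =>
    intro c res
    simp only [List.foldl, pxRec, List.zip]
    exact ih _ _

-- ===== VERDICT (by name: the statement is the Claim_ definition above) =====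
theorem countAUtil_spec : Claim_equal_countAUtil := by
  intro A n x y _hD hPre
  unfold Pre_countAUtil at hPre
  unfold Spec_countAUtil countAUtil countAUtil_alt
  by_cases hn : n ≤ 0
  · have hmax : max n 0 = 0 := by omega
    rw [PySem.List.pyRange_one_eq_nil hn, hmax]
    rw [PySem.List.slice_to (xs := A) (le_rfl : (0:Int) ≤ 0)]
    norm_num
  · rw [not_le] at hn
    have hmax : max n 0 = n := by omega
    rw [hmax, PySem.List.slice_to (xs := A) (le_of_lt hn)]
    have hlen : ((A.take n.toNat).length : Int) = n := by
      simp; omega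
    -- A's loop over range(n) is a loop over the length-n prefix
    have hfold : ∀ (f : (Int × Int) → Int → (Int × Int)) (init : Int × Int),
        (PySem.List.pyRange 0 n 1).foldl (fun s i => f s (PySem.List.pyGetD A i 0)) init
          = (A.take n.toNat).foldl f init := by
      intro f init
      have hcong : ∀ (acc : Int × Int) (i : Int), i ∈ PySem.List.pyRange 0 n 1 →
          f acc (PySem.List.pyGetD A i 0) = f acc (PySem.List.pyGetD (A.take n.toNat) i 0) := by
        intro acc i hi
        rw [PySem.List.mem_pyRange_one] at hi
        obtain ⟨h0, h1⟩ := hi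
        rw [PySem.List.pyGetD_eq_getElem A 0 h0 (by omega),
            PySem.List.pyGetD_eq_getElem (A.take n.toNat) 0 h0 (by omega)]
        simp [List.getElem_take]
      rw [PySem.List.foldl_congr_mem _ _ _ _ hcong]
      have h := PySem.List.foldl_pyRange_zero_pyGetD' (A.take n.toNat) 0 f init
      rw [hlen] at h
      exact h
    rw [hfold (fun s v =>
      let cx := if v = x then s.2 + 1 else s.2
      (if v = y then s.1 + cx else s.1, cx)) (0, 0)]
    rw [main_lemma x y (A.take n.toNat) 0 0]
    simp only [px_build x (A.take n.toNat) [] 0, List.nil_append]
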